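-- pv_equiv track=rewrite | github.com/CardinisCode/learning-python | finalproblems/finalproblem10testing.py | clean_my_string
-- ===== SOURCE A (Python) =====
-- def clean_my_string(message_to_encryp):
--     my_message = message_to_encryp.upper()
--     updated_string = ""
--     for character in my_message:
--         ord_char = ord(character)
--         if ord_char == 74:
--             ord_char = 73
--         if ord_char >= 65 and ord_char <= 90:
--             updated_string += chr(ord_char)
--
--     return updated_string
--
-- message_to_encryp = "PS. Hello, world"
-- ===== SOURCE B (Python) =====
-- import re
--
-- def clean_my_string(message_to_encryp):
--     s = message_to_encryp.upper().replace('J', 'I')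
--     return re.sub('[^A-Z]', '', s)
-- ===== Notes on version B (the rewrite author's own statement) =====
-- stated objective: faster
-- what changed: Replaces the explicit per-character ord-comparison accumulation loop with an upper/replace pipeline followed by a regex deletion of all characters outside A-Z.
import Mathlib
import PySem

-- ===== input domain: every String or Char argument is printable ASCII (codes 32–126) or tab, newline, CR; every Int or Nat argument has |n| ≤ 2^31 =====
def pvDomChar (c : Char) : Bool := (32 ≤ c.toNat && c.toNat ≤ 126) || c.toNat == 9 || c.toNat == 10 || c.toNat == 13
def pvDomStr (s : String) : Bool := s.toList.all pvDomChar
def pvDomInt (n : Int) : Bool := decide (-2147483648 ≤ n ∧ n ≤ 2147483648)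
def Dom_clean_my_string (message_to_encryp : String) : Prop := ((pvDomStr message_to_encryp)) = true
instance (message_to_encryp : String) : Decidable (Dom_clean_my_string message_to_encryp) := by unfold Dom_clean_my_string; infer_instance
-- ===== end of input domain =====

-- B replaces A's explicit per-character ord-comparison loop with an idiomatic
-- upper()/replace('J','I') + regex filter pipeline; return values are proved equal.


-- ===== PORT A =====
def clean_my_string (message_to_encryp : String) : String :=
  let my_message := PySem.Str.upper message_to_encryp
  let updated_string : List Char :=
    my_message.toList.foldl (fun updated_string character =>
      let ord_char := character.toNat
      let ord_char := if ord_char = 74 then 73 else ord_char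
      if 65 ≤ ord_char ∧ ord_char ≤ 90 then updated_string ++ [Char.ofNat ord_char]
      else updated_string) []
  String.ofList updated_string

-- ===== PORT B =====
def clean_my_string_alt (message_to_encryp : String) : String :=
  let s := PySem.Str.replace (PySem.Str.upper message_to_encryp) "J" "I"
  -- re.sub('[^A-Z]', '', s): the pattern is a plain character class, so this is
  -- exactly "delete every character outside 'A'..'Z'" (exact on all inputs)
  String.ofList (s.toList.filter (fun c => 'A' ≤ c ∧ c ≤ 'Z'))

-- ===== PRECONDITION & SPEC =====
def Spec_clean_my_string (message_to_encryp : String) (out : String) : Prop := out = clean_my_string_alt message_to_encryp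
instance (message_to_encryp : String) (out : String) : Decidable (Spec_clean_my_string message_to_encryp out) := by unfold Spec_clean_my_string; infer_instance

-- ===== CLAIM (what is proved, stated in full; the proofs are below) =====
def Claim_equal_clean_my_string : Prop := ∀ (message_to_encryp : String), Dom_clean_my_string message_to_encryp → Spec_clean_my_string message_to_encryp (clean_my_string message_to_encryp)

-- ===== LEMMAS AND PROOFS =====

theorem char_eq_J_of_toNat (c : Char) (h : c.toNat = 74) : c = 'J' := by
  have := (Char.ofNat_toNat c).symm
  rw [h] at this
  rw [this]

theorem char_le_iff_toNat (c d : Char) : (c ≤ d) ↔ c.toNat ≤ d.toNat := by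
  rw [Char.le_def, UInt32.le_iff_toNat_le]; rfl

-- single-character str.replace is a pointwise map
theorem replace_go_single (fuel : Nat) (l acc : List Char) (h : l.length ≤ fuel) :
    PySem.Chars.replace.go ['J'] ['I'] fuel l acc =
      acc.reverse ++ l.map (fun c => if c = 'J' then 'I' else c) := by
  induction fuel generalizing l acc with
  | zero =>
    cases l with
    | nil => simp [PySem.Chars.replace.go]
    | cons c t => simp at h
  | succ n ih =>
    cases l with
    | nil => simp [PySem.Chars.replace.go]
    | cons c t =>
      simp only [List.length_cons, Nat.succ_le_succ_iff] at h
      rw [PySem.Chars.replace.go]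
      by_cases hc : c = 'J'
      · subst hc
        have hp : List.isPrefixOf ['J'] ('J' :: t) = true := by simp [List.isPrefixOf]
        rw [hp]
        simp only [if_true]
        rw [ih _ _ (by simpa using h)]
        simp
      · have hp : List.isPrefixOf ['J'] (c :: t) = false := by
          simp [List.isPrefixOf]
          intro hbe
          exact hc hbe.symm
        rw [hp]
        simp only [Bool.false_eq_true, if_false]
        rw [ih t (c :: acc) h]
        simp [hc]

theorem replace_single (u : List Char) :
    PySem.Chars.replace u ['J'] ['I'] = u.map (fun c => if c = 'J' then 'I' else c) := by
  unfold PySem.Chars.replace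
  simp only [List.isEmpty_cons, Bool.false_eq_true, if_false]
  exact replace_go_single u.length u [] le_rfl

-- A's accumulation loop, characterised as filter-then-map
theorem fold_eq (l acc : List Char) :
    l.foldl (fun updated_string character =>
      if (65 ≤ (if character.toNat = 74 then 73 else character.toNat)) ∧
         (if character.toNat = 74 then 73 else character.toNat) ≤ 90
      then updated_string ++ [Char.ofNat (if character.toNat = 74 then 73 else character.toNat)]
      else updated_string) acc =
    acc ++ (l.filter (fun character =>
        decide ((65 ≤ (if character.toNat = 74 then 73 else character.toNat)) ∧
                (if character.toNat = 74 then 73 else character.toNat) ≤ 90))).map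
      (fun character => Char.ofNat (if character.toNat = 74 then 73 else character.toNat)) := by
  induction l generalizing acc with
  | nil => simp
  | cons c t ih =>
    simp only [List.foldl_cons, List.filter_cons]
    by_cases hp : (65 ≤ (if c.toNat = 74 then 73 else c.toNat)) ∧
        (if c.toNat = 74 then 73 else c.toNat) ≤ 90
    · rw [if_pos hp, ih]
      simp [hp]
    · rw [if_neg hp, ih]
      simp [hp]

theorem filter_map_eq_flatMap (p : Char → Bool) (f : Char → Char) (l : List Char) :
    (l.filter p).map f = l.flatMap (fun c => if p c then [f c] else []) := by
  induction l with
  | nil => rfl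
  | cons c t ih =>
    simp only [List.filter_cons, List.flatMap_cons]
    by_cases hp : p c = true
    · simp [hp, ih]
    · simp [hp, ih]

theorem map_filter_eq_flatMap (q : Char → Bool) (j : Char → Char) (l : List Char) :
    (l.map j).filter q = l.flatMap (fun c => if q (j c) then [j c] else []) := by
  induction l with
  | nil => rfl
  | cons c t ih =>
    simp only [List.map_cons, List.filter_cons, List.flatMap_cons]
    by_cases hq : q (j c) = true
    · simp [hq, ih]
    · simp [hq, ih]

-- per-character: A's mapped-ord test and emitted char agree with B's J-replace + A-Z test
theorem point_eq (c : Char) :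
    (if decide ((65 ≤ (if c.toNat = 74 then 73 else c.toNat)) ∧
          (if c.toNat = 74 then 73 else c.toNat) ≤ 90) = true
     then [Char.ofNat (if c.toNat = 74 then 73 else c.toNat)] else []) =
    (if decide ('A' ≤ (if c = 'J' then 'I' else c) ∧ (if c = 'J' then 'I' else c) ≤ 'Z') = true
     then [if c = 'J' then 'I' else c] else []) := by
  by_cases hc : c = 'J'
  · subst hc
    decide
  · have h74 : c.toNat ≠ 74 := fun h => hc (char_eq_J_of_toNat c h)
    have hA : ('A' : Char).toNat = 65 := rfl
    have hZ : ('Z' : Char).toNat = 90 := rfl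
    have hq : ('A' ≤ c ∧ c ≤ 'Z') ↔ (65 ≤ c.toNat ∧ c.toNat ≤ 90) := by
      rw [char_le_iff_toNat, char_le_iff_toNat, hA, hZ]
    simp only [if_neg hc, if_neg h74]
    by_cases hr : 65 ≤ c.toNat ∧ c.toNat ≤ 90
    · rw [if_pos (by simpa using hr), if_pos (by simpa using hq.mpr hr), Char.ofNat_toNat]
    · rw [if_neg (by simpa using hr), if_neg (by simpa using fun h => hr (hq.mp h))]

-- A's filter-then-map equals B's map-then-filter, character-list level
theorem core_eq (u : List Char) :
    (u.filter (fun character =>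
        decide ((65 ≤ (if character.toNat = 74 then 73 else character.toNat)) ∧
                (if character.toNat = 74 then 73 else character.toNat) ≤ 90))).map
      (fun character => Char.ofNat (if character.toNat = 74 then 73 else character.toNat)) =
    (u.map (fun c => if c = 'J' then 'I' else c)).filter (fun c => decide ('A' ≤ c ∧ c ≤ 'Z')) := by
  rw [filter_map_eq_flatMap, map_filter_eq_flatMap]
  exact congrArg u.flatMap (funext point_eq)
-- ===== VERDICT (by name: the statement is the Claim_ definition above) =====
theorem clean_my_string_spec : Claim_equal_clean_my_string := by
  intro m _
  unfold Spec_clean_my_string clean_my_string clean_my_string_alt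
  simp only [PySem.Str.toList_replace]
  rw [show ("J" : String).toList = ['J'] from rfl, show ("I" : String).toList = ['I'] from rfl]
  rw [replace_single, fold_eq, List.nil_append, core_eq]
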